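-- pv_equiv track=rewrite | github.com/SY97P/Python | 13주차/[파이썬]13주차과제_201513384_박세영/실습2번_sumOfTable.py | printSumTable
-- ===== SOURCE A (Python) =====
-- def printSumTable(lst, count) :
--     sum = 0
--     sumlst = []
--
--     for i in range(count) :
--         for j in range(i, count) :
--             sum += lst[j][i]
--         sumlst.append(sum)
--         sum = 0
--
--     return sumlst
-- ===== SOURCE B (Python) =====
-- def printSumTable(lst, count):
--     # Row-major accumulation: maintain all column running sums at once;
--     # lst[j][i] contributes to output column i exactly when i <= j.
--     sumlst = [0] * count
--     for j in range(count):
--         row = lst[j]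
--         for i in range(j + 1):
--             sumlst[i] += row[i]
--     return sumlst
-- ===== Notes on version B (the rewrite author's own statement) =====
-- stated objective: alternative
-- what changed: Column-order scan with one scalar accumulator reset per column is replaced by a single row-major pass that maintains an array of all column running sums (sumlst[i] += lst[j][i] for i <= j).
import Mathlib
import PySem

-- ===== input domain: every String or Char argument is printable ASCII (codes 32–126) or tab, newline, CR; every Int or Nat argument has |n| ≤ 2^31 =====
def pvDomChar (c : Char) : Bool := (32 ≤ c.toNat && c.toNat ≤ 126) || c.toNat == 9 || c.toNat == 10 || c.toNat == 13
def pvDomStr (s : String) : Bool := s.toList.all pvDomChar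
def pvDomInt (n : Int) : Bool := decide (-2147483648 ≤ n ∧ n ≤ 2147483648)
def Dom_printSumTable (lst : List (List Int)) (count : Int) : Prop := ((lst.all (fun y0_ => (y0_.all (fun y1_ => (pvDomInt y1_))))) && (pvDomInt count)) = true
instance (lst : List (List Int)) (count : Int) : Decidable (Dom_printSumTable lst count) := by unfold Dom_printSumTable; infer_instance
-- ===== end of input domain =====

-- B replaces A's column-order scan (scalar accumulator reset per column) by one
-- row-major pass maintaining an array of all column running sums; same output.

-- ===== PORT A =====
def printSumTable (lst : List (List Int)) (count : Int) : List Int :=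
  (PySem.List.pyRange 0 count 1).foldl
    (fun sumlst i =>
      sumlst ++ [(PySem.List.pyRange i count 1).foldl
        (fun s j => s + PySem.List.pyGetD (PySem.List.pyGetD lst j []) i 0) 0])
    []

-- ===== PORT B =====
def printSumTable_alt (lst : List (List Int)) (count : Int) : List Int :=
  (PySem.List.pyRange 0 count 1).foldl
    (fun sumlst j =>
      let row := PySem.List.pyGetD lst j []
      (PySem.List.pyRange 0 (j + 1) 1).foldl
        (fun sl i => PySem.List.pySetD sl i (PySem.List.pyGetD sl i 0 + PySem.List.pyGetD row i 0))
        sumlst)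
    (List.replicate count.toNat 0)

-- ===== PRECONDITION & SPEC =====
-- Pre_ excludes exactly the inputs where Python A raises IndexError:
-- it accesses lst[j][i] for every 0 ≤ i ≤ j < count.
def Pre_printSumTable (lst : List (List Int)) (count : Int) : Prop :=
  count ≤ (lst.length : Int) ∧ ∀ j ∈ List.range count.toNat, j < (lst.getD j []).length
instance (lst : List (List Int)) (count : Int) : Decidable (Pre_printSumTable lst count) := by
  unfold Pre_printSumTable; infer_instance
def pvWitness_printSumTable : List (List Int) × Int := ([[1], [2, 3], [4, 5, 6]], 3)

def Spec_printSumTable (lst : List (List Int)) (count : Int) (out : List Int) : Prop := out = printSumTable_alt lst count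
instance (lst : List (List Int)) (count : Int) (out : List Int) : Decidable (Spec_printSumTable lst count out) := by unfold Spec_printSumTable; infer_instance

-- ===== CLAIM (what is proved, stated in full; the proofs are below) =====
def Claim_equal_printSumTable : Prop := ∀ (lst : List (List Int)) (count : Int), Dom_printSumTable lst count → Pre_printSumTable lst count → Spec_printSumTable lst count (printSumTable lst count)

-- ===== LEMMAS AND PROOFS =====

-- column sum: sum of lst[jj][i] over jj in range(i', j) (the proof's invariant quantity)
def pvColSum (lst : List (List Int)) (i j : Int) : Int :=
  ((PySem.List.pyRange i j 1).map (fun jj => PySem.List.pyGetD (PySem.List.pyGetD lst jj []) i 0)).sum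

theorem pvColSum_nil (lst : List (List Int)) {i j : Int} (h : j ≤ i) : pvColSum lst i j = 0 := by
  simp [pvColSum, PySem.List.pyRange_one_eq_nil h]

theorem pvColSum_succ (lst : List (List Int)) {i j : Int} (h : i ≤ j) :
    pvColSum lst i (j + 1) = pvColSum lst i j + PySem.List.pyGetD (PySem.List.pyGetD lst j []) i 0 := by
  simp [pvColSum, PySem.List.pyRange_one_succ_right h]

theorem pv_A_char (lst : List (List Int)) (count : Int) :
    printSumTable lst count = (List.range count.toNat).map (fun k : Nat => pvColSum lst (k : Int) count) := by
  unfold printSumTable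
  rw [PySem.List.foldl_append_singleton_eq_map
        (fun i => (PySem.List.pyRange i count 1).foldl
          (fun s j => s + PySem.List.pyGetD (PySem.List.pyGetD lst j []) i 0) 0)]
  rw [PySem.List.pyRange_one 0 count, List.map_map]
  simp only [List.nil_append, Int.sub_zero]
  apply List.map_congr_left
  intro k _
  simp [pvColSum, PySem.List.foldl_add]

theorem pv_set_map_range {L m : Nat} (f : Nat → Int) (v : Int) (_hm : m < L) :
    ((List.range L).map f).set m v = (List.range L).map (fun i => if i = m then v else f i) := by
  refine List.ext_getElem (by simp) ?_
  intro i h1 h2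
  rw [List.getElem_set]
  simp only [List.getElem_map, List.getElem_range]
  split_ifs with h3 h4 h4 <;> first | rfl | omega

theorem pv_inner (row : List Int) (m L : Nat) (f : Nat → Int) (hm : m ≤ L) :
    (PySem.List.pyRange 0 (m : Int) 1).foldl
      (fun sl i => PySem.List.pySetD sl i (PySem.List.pyGetD sl i 0 + PySem.List.pyGetD row i 0))
      ((List.range L).map f)
    = (List.range L).map (fun i => if i < m then f i + row.getD i 0 else f i) := by
  induction m with
  | zero => simp [PySem.List.pyRange_one_eq_nil (le_refl (0 : Int))]
  | succ m ih =>
    have hmL : m < L := hm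
    rw [show ((m + 1 : Nat) : Int) = (m : Int) + 1 by push_cast; ring,
        PySem.List.pyRange_one_succ_right (by positivity : (0 : Int) ≤ (m : Int)),
        List.foldl_append, ih (Nat.le_of_succ_le hm)]
    simp only [List.foldl_cons, List.foldl_nil, PySem.List.pySetD_natCast, PySem.List.pyGetD_natCast]
    rw [PySem.List.getD_map_range _ _ _ _ hmL, pv_set_map_range _ _ hmL]
    apply List.map_congr_left
    intro i hi
    simp only [List.mem_range] at hi
    split_ifs with h1 h2 h2 <;> subst_eqs <;> simp_all <;> omega

theorem pv_outer (lst : List (List Int)) (count : Int) (j : Nat) (hj : j ≤ count.toNat) :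
    (PySem.List.pyRange 0 (j : Int) 1).foldl
      (fun sumlst j' =>
        (PySem.List.pyRange 0 (j' + 1) 1).foldl
          (fun sl i => PySem.List.pySetD sl i
            (PySem.List.pyGetD sl i 0 + PySem.List.pyGetD (PySem.List.pyGetD lst j' []) i 0))
          sumlst)
      (List.replicate count.toNat 0)
    = (List.range count.toNat).map (fun i : Nat => pvColSum lst (i : Int) (j : Int)) := by
  induction j with
  | zero =>
    rw [show ((0 : Nat) : Int) = 0 by simp,
        PySem.List.pyRange_one_eq_nil (le_refl (0 : Int)), List.foldl_nil]
    refine List.ext_getElem (by simp) ?_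
    intro i h1 h2
    simp only [List.getElem_replicate, List.getElem_map, List.getElem_range]
    exact (pvColSum_nil lst (by positivity)).symm
  | succ j ih =>
    rw [show ((j + 1 : Nat) : Int) = (j : Int) + 1 by push_cast; ring,
        PySem.List.pyRange_one_succ_right (by positivity : (0 : Int) ≤ (j : Int)),
        List.foldl_append, ih (Nat.le_of_succ_le hj)]
    simp only [List.foldl_cons, List.foldl_nil]
    rw [show ((j : Int) + 1) = ((j + 1 : Nat) : Int) by push_cast; ring,
        pv_inner (PySem.List.pyGetD lst (j : Int) []) (j + 1) count.toNat _ hj]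
    apply List.map_congr_left
    intro i hi
    simp only [List.mem_range] at hi
    by_cases h : i < j + 1
    · have hij : (i : Int) ≤ (j : Int) := by exact_mod_cast Nat.lt_succ_iff.mp h
      rw [if_pos h, show ((j + 1 : Nat) : Int) = (j : Int) + 1 by push_cast; ring,
          pvColSum_succ lst hij]
      simp [PySem.List.pyGetD_natCast]
    · rw [if_neg h, pvColSum_nil lst (by exact_mod_cast (show j ≤ i by omega)),
          pvColSum_nil lst (by push_cast; omega)]

-- ===== VERDICT (by name: the statement is the Claim_ definition above) =====
theorem printSumTable_spec : Claim_equal_printSumTable := by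
  intro lst count _ _
  unfold Spec_printSumTable
  rw [pv_A_char]
  rcases le_or_gt count 0 with hc | hc
  · have h0 : count.toNat = 0 := Int.toNat_of_nonpos hc
    unfold printSumTable_alt
    rw [PySem.List.pyRange_one_eq_nil hc, List.foldl_nil, h0]
    simp
  · have hcn : ((count.toNat : Int)) = count := Int.toNat_of_nonneg (le_of_lt hc)
    have h2 : printSumTable_alt lst count
        = (List.range count.toNat).map (fun i : Nat => pvColSum lst (i : Int) count) := by
      unfold printSumTable_alt
      have h3 := pv_outer lst count count.toNat (le_refl _)
      rw [hcn] at h3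
      exact h3
    rw [h2]
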